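-- pv_equiv track=rewrite | github.com/darren-huang/leetcode-grind | hackerrank_comps/moodys_analytics_women_eng_2018/5.marmelade_wall.py | solve
-- ===== SOURCE A (Python) =====
-- from collections import deque
--
-- def get_costs(l, t, r, a):
--     costs = []
--     window_sum = 0
--     window_len = 0
--     max_window_len = (t - l + 1) + (t - r + 1)
--     for i, ai in enumerate(a):
--         window_sum += ai
--         window_len += 1
--         if window_len > max_window_len:
--             window_sum -= a[i - window_len + 1]
--             window_len -= 1
--         if window_len == max_window_len:
--             costs.append(window_sum)
--
--     strong_wall_cost = ((t + l) * (t - l + 1) // 2) + ((t + r) * (t - r + 1) // 2)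
--     return [strong_wall_cost - c for c in costs]
--
-- def overlap(i1, i2):
--     return not (i1[1] < i2[0] or i2[1] < i1[0])
--
-- def append_merge(intervals, new_interval):
--     while intervals and overlap(intervals[-1], new_interval):
--         n_int = intervals.pop()
--         new_interval = (
--             min(new_interval[0], n_int[0]),
--             max(new_interval[1], n_int[1]),
--         )
--     intervals.append(new_interval)
--
-- def get_inval_intervals(l, t, r, a):
--     left_invervals = deque()
--     right_intervals = deque()
--     window_len = (t - l + 1) + (t - r + 1)
--     for i, ai in enumerate(a):
--         if ai > l:
--             num_invalid = min(ai, t + 1) - l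
--             append_merge(left_invervals, (i - (num_invalid - 1), i))
--         if ai > r:
--             num_invalid = min(ai, t + 1) - r
--             append_merge(
--                 right_intervals,
--                 (
--                     i - (window_len - 1),
--                     i + (num_invalid - 1) - (window_len - 1),
--                 ),
--             )
--     return left_invervals, right_intervals
--
-- def solve(l, t, r, a):
--     window_len = (t - l + 1) + (t - r + 1)
--     min_cost = float("inf")
--     costs = get_costs(l, t, r, a)
--     int1, int2 = get_inval_intervals(l, t, r, a)
--     for i in range(len(a) - (window_len - 1)):
--         while int1 and int1[0][1] < i:
--             int1.popleft()
--         while int2 and int2[0][1] < i: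
--             int2.popleft()
--
--         if int1 and int1[0][0] <= i and int1[0][1] >= i:
--             continue
--         if int2 and int2[0][0] <= i and int2[0][1] >= i:
--             continue
--
--         min_cost = min(min_cost, costs[i])
--     return min_cost if min_cost != float("inf") else -1
-- ===== SOURCE B (Python) =====
-- def solve(l, t, r, a):
--     # wall profile: ascend l..t then descend t..r; a window start is valid
--     # iff no existing column pokes above the profile
--     w = (t - l + 1) + (t - r + 1)
--     n = len(a)
--     if n < w:
--         return -1
--     profile = list(range(l, t + 1)) + list(range(t, r - 1, -1))
--     target = sum(profile)
--     win = sum(a[:w])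
--     best = None
--     for i in range(n - w + 1):
--         if i:
--             win += a[i + w - 1] - a[i - 1]
--         if all(a[i + d] <= profile[d] for d in range(w)):
--             c = target - win
--             if best is None or c < best:
--                 best = c
--     return -1 if best is None else best
-- ===== Notes on version B (the rewrite author's own statement) =====
-- stated objective: simpler
-- what changed: B drops the interval-merging deques and the sweep entirely: it materialises the wall profile (ascending l..t then descending t..r) once and, for each window start, checks directly that no existing column exceeds the profile, taking the minimum cost via the same sliding window sum; A's get_inval_intervals/append_merge/popleft machinery disappears.
-- outside the precondition, e.g. on solve(6, 4, 4, [0, -2, 3, 10, 5, 9]): A returns -1, B returns 4; on solve(5, 0, -3, []): A raises IndexError, B returns -6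
import Mathlib
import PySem

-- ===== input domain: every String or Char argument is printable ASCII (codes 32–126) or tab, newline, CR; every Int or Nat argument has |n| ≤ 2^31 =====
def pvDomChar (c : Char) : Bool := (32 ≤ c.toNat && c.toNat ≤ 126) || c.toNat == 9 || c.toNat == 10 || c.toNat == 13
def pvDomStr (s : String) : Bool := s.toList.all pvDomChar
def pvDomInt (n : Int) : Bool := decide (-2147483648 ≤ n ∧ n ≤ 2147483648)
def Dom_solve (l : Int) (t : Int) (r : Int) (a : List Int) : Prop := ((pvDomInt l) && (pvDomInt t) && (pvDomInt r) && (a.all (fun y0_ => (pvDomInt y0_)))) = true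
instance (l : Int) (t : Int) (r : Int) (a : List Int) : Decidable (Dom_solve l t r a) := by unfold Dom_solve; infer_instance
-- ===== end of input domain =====

-- B replaces A's interval-merging deques and sweep by a direct check of each window
-- against the wall profile (simpler; not faster — O(n*w) instead of O(n)).

-- ===== PORT A =====

def pvGetCosts (l t r : Int) (a : List Int) : List Int :=
  let maxWindowLen := (t - l + 1) + (t - r + 1)
  let st := (PySem.List.enumerate a).foldl
    (fun (s : List Int × Int × Int) (p : Int × Int) =>
      let ws := s.2.1 + p.2
      let wl := s.2.2 + 1
      -- a[i - window_len + 1]: this index is always in range (0 ≤ i-wl+1 ≤ i < len a)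
      let ws' := if wl > maxWindowLen then ws - PySem.List.pyGetD a (p.1 - wl + 1) 0 else ws
      let wl' := if wl > maxWindowLen then wl - 1 else wl
      if wl' == maxWindowLen then (s.1 ++ [ws'], ws', wl') else (s.1, ws', wl'))
    ([], 0, 0)
  let strongWallCost := PySem.Int.floordiv ((t + l) * (t - l + 1)) 2 +
    PySem.Int.floordiv ((t + r) * (t - r + 1)) 2
  st.1.map (fun c => strongWallCost - c)

def pvOverlap (i1 i2 : Int × Int) : Bool := !(decide (i1.2 < i2.1) || decide (i2.2 < i1.1))

def pvAppendMerge (intervals : List (Int × Int)) (newInterval : Int × Int) : List (Int × Int) :=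
  match h : intervals.getLast? with
  | none => intervals ++ [newInterval]
  | some nInt =>
    if pvOverlap nInt newInterval then
      pvAppendMerge intervals.dropLast (min newInterval.1 nInt.1, max newInterval.2 nInt.2)
    else intervals ++ [newInterval]
termination_by intervals.length
decreasing_by
  cases intervals with
  | nil => simp at h
  | cons x xs => simp [List.length_dropLast]

def pvGetInvalIntervals (l t r : Int) (a : List Int) : List (Int × Int) × List (Int × Int) :=
  let windowLen := (t - l + 1) + (t - r + 1)
  (PySem.List.enumerate a).foldl
    (fun (s : List (Int × Int) × List (Int × Int)) (p : Int × Int) =>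
      let s1 := if p.2 > l then
          pvAppendMerge s.1 (p.1 - (min p.2 (t + 1) - l - 1), p.1)
        else s.1
      let s2 := if p.2 > r then
          pvAppendMerge s.2 (p.1 - (windowLen - 1), p.1 + (min p.2 (t + 1) - r - 1) - (windowLen - 1))
        else s.2
      (s1, s2))
    ([], [])

-- 'while int and int[0][1] < i: int.popleft()'
def pvPopWhile (i : Int) : List (Int × Int) → List (Int × Int)
  | [] => []
  | iv :: rest => if iv.2 < i then pvPopWhile i rest else iv :: rest

def solve (l : Int) (t : Int) (r : Int) (a : List Int) : Int :=
  let windowLen := (t - l + 1) + (t - r + 1)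
  let costs := pvGetCosts l t r a
  let ints := pvGetInvalIntervals l t r a
  let st := (PySem.List.pyRange 0 ((a.length : Int) - (windowLen - 1)) 1).foldl
    (fun (s : List (Int × Int) × List (Int × Int) × Option Int) (i : Int) =>
      let int1 := pvPopWhile i s.1
      let int2 := pvPopWhile i s.2.1
      if int1.head?.elim false (fun iv => decide (iv.1 ≤ i) && decide (iv.2 ≥ i)) then
        (int1, int2, s.2.2)
      else if int2.head?.elim false (fun iv => decide (iv.1 ≤ i) && decide (iv.2 ≥ i)) then
        (int1, int2, s.2.2)
      else
        -- costs[i]: in range for every i this loop reaches when l ≤ t ∧ r ≤ t (Pre_)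
        let c := PySem.List.pyGetD costs i 0
        (int1, int2, some (match s.2.2 with | none => c | some m => min m c)))
    (ints.1, ints.2, none)
  match st.2.2 with
  | none => -1
  | some m => m

-- ===== PORT B =====

def solve_alt (l : Int) (t : Int) (r : Int) (a : List Int) : Int :=
  let w : Int := (t - l + 1) + (t - r + 1)
  let n := a.length
  if (n : Int) < w then -1
  else
    let profile := PySem.List.pyRange l (t + 1) 1 ++ PySem.List.pyRange t (r - 1) (-1)
    let target := profile.sum
    let win0 := (PySem.List.slice a none (some w)).sum
    let best : Option Int :=
      ((PySem.List.pyRange 0 ((n : Int) - w + 1) 1).foldl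
        (fun (s : Int × Option Int) (i : Int) =>
          let win := if i ≠ 0 then s.1 + PySem.List.pyGetD a (i + w - 1) 0 - PySem.List.pyGetD a (i - 1) 0 else s.1
          -- profile[d]: in range for every checked d when l ≤ t ∧ r ≤ t (Pre_); a[i+d] always in range here
          if (PySem.List.pyRange 0 w 1).all
              (fun d => decide (PySem.List.pyGetD a (i + d) 0 ≤ PySem.List.pyGetD profile d 0)) then
            (win, some (match s.2 with | none => target - win | some b => if target - win < b then target - win else b))
          else (win, s.2))
        (win0, none)).2
    match best with
    | none => -1
    | some b => b

-- ===== PRECONDITION & SPEC =====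
-- Pre_ restricts to the task's natural domain of well-formed wall profiles (l ≤ t and r ≤ t);
-- on degenerate profiles A raises IndexError on many inputs and its other returns are artefacts
-- of Gauss/interval arithmetic applied to an empty or negative staircase.
def Pre_solve (l : Int) (t : Int) (r : Int) (a : List Int) : Prop := l ≤ t ∧ r ≤ t
instance (l : Int) (t : Int) (r : Int) (a : List Int) : Decidable (Pre_solve l t r a) := by
  unfold Pre_solve; infer_instance

def pvWitness_solve : Int × Int × Int × List Int := (1, 2, 1, [1, 0, 3, 0, 1, 0])

def Spec_solve (l : Int) (t : Int) (r : Int) (a : List Int) (out : Int) : Prop := out = solve_alt l t r a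
instance (l : Int) (t : Int) (r : Int) (a : List Int) (out : Int) : Decidable (Spec_solve l t r a out) := by
  unfold Spec_solve; infer_instance

-- ===== CLAIM (what is proved, stated in full; the proofs are below) =====
def Claim_equal_solve : Prop := ∀ (l : Int) (t : Int) (r : Int) (a : List Int),
  Dom_solve l t r a → Pre_solve l t r a → Spec_solve l t r a (solve l t r a)

-- ===== LEMMAS AND PROOFS =====

def pvCovers (iv : Int × Int) (i : Int) : Prop := iv.1 ≤ i ∧ i ≤ iv.2
def pvUnion (s : List (Int × Int)) (i : Int) : Prop := ∃ iv ∈ s, pvCovers iv i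
def pvInv (s : List (Int × Int)) : Prop :=
  s.Pairwise (fun p q => p.2 < q.1) ∧ ∀ iv ∈ s, iv.1 ≤ iv.2
def pvWinSum (a : List Int) (W : Nat) (i : Nat) : Int := ((a.drop i).take W).sum

def pvCostStep (WL : Int) (a : List Int) (s : List Int × Int × Int) (p : Int × Int) :
    List Int × Int × Int :=
  let ws := s.2.1 + p.2
  let wl := s.2.2 + 1
  let ws' := if wl > WL then ws - PySem.List.pyGetD a (p.1 - wl + 1) 0 else ws
  let wl' := if wl > WL then wl - 1 else wl
  if wl' == WL then (s.1 ++ [ws'], ws', wl') else (s.1, ws', wl')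

theorem am_eq_none {s : List (Int × Int)} {ni : Int × Int} (h : s.getLast? = none) :
    pvAppendMerge s ni = s ++ [ni] := by
  rw [pvAppendMerge]; split <;> simp_all

theorem am_eq_some_ov {s : List (Int × Int)} {ni nInt : Int × Int}
    (h : s.getLast? = some nInt) (hov : pvOverlap nInt ni = true) :
    pvAppendMerge s ni = pvAppendMerge s.dropLast (min ni.1 nInt.1, max ni.2 nInt.2) := by
  rw [pvAppendMerge]; split <;> simp_all

theorem am_eq_some_nov {s : List (Int × Int)} {ni nInt : Int × Int}
    (h : s.getLast? = some nInt) (hov : ¬ pvOverlap nInt ni = true) :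
    pvAppendMerge s ni = s ++ [ni] := by
  rw [pvAppendMerge]; split <;> simp_all

theorem am_start_le (s : List (Int × Int)) (ni : Int × Int) (c : Int)
    (hs : ∀ iv ∈ s, iv.1 ≤ c) (hn : ni.1 ≤ c) :
    ∀ iv ∈ pvAppendMerge s ni, iv.1 ≤ c := by
  induction s, ni using pvAppendMerge.induct with
  | case1 s ni h =>
    rw [am_eq_none h]
    intro iv hiv; rcases List.mem_append.mp hiv with hiv | hiv
    · exact hs _ hiv
    · simp at hiv; subst hiv; exact hn
  | case2 s ni nInt h hov ih =>
    rw [am_eq_some_ov h hov]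
    obtain ⟨s', rfl⟩ := List.getLast?_eq_some_iff.mp h
    rw [List.dropLast_concat] at ih ⊢
    refine ih (fun iv' hiv' => hs _ (by simp [hiv'])) ?_
    simp only; have := hs nInt (by simp); omega
  | case3 s ni nInt h hov =>
    rw [am_eq_some_nov h hov]
    intro iv hiv; rcases List.mem_append.mp hiv with hiv | hiv
    · exact hs _ hiv
    · simp at hiv; subst hiv; exact hn

theorem am_end_le (s : List (Int × Int)) (ni : Int × Int) (c : Int)
    (hs : ∀ iv ∈ s, iv.2 ≤ c) (hn : ni.2 ≤ c) :
    ∀ iv ∈ pvAppendMerge s ni, iv.2 ≤ c := by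
  induction s, ni using pvAppendMerge.induct with
  | case1 s ni h =>
    rw [am_eq_none h]
    intro iv hiv; rcases List.mem_append.mp hiv with hiv | hiv
    · exact hs _ hiv
    · simp at hiv; subst hiv; exact hn
  | case2 s ni nInt h hov ih =>
    rw [am_eq_some_ov h hov]
    obtain ⟨s', rfl⟩ := List.getLast?_eq_some_iff.mp h
    rw [List.dropLast_concat] at ih ⊢
    refine ih (fun iv' hiv' => hs _ (by simp [hiv'])) ?_
    simp only; have := hs nInt (by simp); omega
  | case3 s ni nInt h hov =>
    rw [am_eq_some_nov h hov]
    intro iv hiv; rcases List.mem_append.mp hiv with hiv | hiv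
    · exact hs _ hiv
    · simp at hiv; subst hiv; exact hn

theorem am_inv (s : List (Int × Int)) (ni : Int × Int)
    (hs : pvInv s) (hne : ni.1 ≤ ni.2) (hb : ∀ iv ∈ s, iv.1 ≤ ni.2) :
    pvInv (pvAppendMerge s ni) := by
  induction s, ni using pvAppendMerge.induct with
  | case1 s ni h =>
    rw [am_eq_none h]
    rw [List.getLast?_eq_none_iff] at h; subst h
    exact ⟨by simp, by simpa using hne⟩
  | case2 s ni nInt h hov ih =>
    rw [am_eq_some_ov h hov]
    obtain ⟨s', rfl⟩ := List.getLast?_eq_some_iff.mp h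
    rw [List.dropLast_concat] at ih ⊢
    have hnInt : nInt.1 ≤ nInt.2 := hs.2 nInt (by simp)
    refine ih ⟨(List.pairwise_append.mp hs.1).1, fun iv hiv => hs.2 _ (by simp [hiv])⟩
      (by simp only; omega) (fun iv hiv => ?_)
    have := hb iv (by simp [hiv]); simp only; omega
  | case3 s ni nInt h hov =>
    rw [am_eq_some_nov h hov]
    obtain ⟨s', rfl⟩ := List.getLast?_eq_some_iff.mp h
    have hnInt : nInt.1 ≤ nInt.2 := hs.2 nInt (by simp)
    have hlt : nInt.2 < ni.1 := by
      simp [pvOverlap] at hov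
      have := hb nInt (by simp)
      omega
    constructor
    · rw [List.pairwise_append]
      refine ⟨hs.1, by simp, fun p hp q hq => ?_⟩
      simp at hq; subst hq
      rcases List.mem_append.mp hp with hp | hp
      · have h1 := (List.pairwise_append.mp hs.1).2.2 p hp nInt (by simp)
        omega
      · simp at hp; subst hp; exact hlt
    · intro iv hiv
      rcases List.mem_append.mp hiv with hiv | hiv
      · exact hs.2 _ hiv
      · simp at hiv; subst hiv; exact hne


theorem pvUnion_append (s : List (Int × Int)) (iv : Int × Int) (i : Int) :
    pvUnion (s ++ [iv]) i ↔ pvUnion s i ∨ pvCovers iv i := by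
  constructor
  · rintro ⟨p, hp, hc⟩
    rcases List.mem_append.mp hp with hp | hp
    · exact Or.inl ⟨p, hp, hc⟩
    · simp at hp; subst hp; exact Or.inr hc
  · rintro (⟨p, hp, hc⟩ | hc)
    · exact ⟨p, List.mem_append_left _ hp, hc⟩
    · exact ⟨iv, List.mem_append_right _ (by simp), hc⟩

theorem am_union (s : List (Int × Int)) (ni : Int × Int)
    (hs : pvInv s) (hne : ni.1 ≤ ni.2) (hb : ∀ iv ∈ s, iv.1 ≤ ni.2) (i : Int) :
    pvUnion (pvAppendMerge s ni) i ↔ pvUnion s i ∨ pvCovers ni i := by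
  induction s, ni using pvAppendMerge.induct with
  | case1 s ni h =>
    rw [am_eq_none h]
    rw [List.getLast?_eq_none_iff] at h; subst h
    simp [pvUnion]
  | case2 s ni nInt h hov ih =>
    rw [am_eq_some_ov h hov]
    obtain ⟨s', rfl⟩ := List.getLast?_eq_some_iff.mp h
    rw [List.dropLast_concat] at ih ⊢
    have hnInt : nInt.1 ≤ nInt.2 := hs.2 nInt (by simp)
    have hov' : ni.1 ≤ nInt.2 ∧ nInt.1 ≤ ni.2 := by simp [pvOverlap] at hov; omega
    rw [ih ⟨(List.pairwise_append.mp hs.1).1, fun iv hiv => hs.2 _ (by simp [hiv])⟩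
      (by simp only; omega)
      (fun iv hiv => by have := hb iv (by simp [hiv]); simp only; omega)]
    have hhull : pvCovers (min ni.1 nInt.1, max ni.2 nInt.2) i ↔ pvCovers nInt i ∨ pvCovers ni i := by
      unfold pvCovers; simp only; omega
    rw [hhull, pvUnion_append]; tauto
  | case3 s ni nInt h hov =>
    rw [am_eq_some_nov h hov, pvUnion_append]

theorem left_fold (l t : Int) (hl : l ≤ t) (as : List Int) :
    ∀ (j : Int) (acc : List (Int × Int)), pvInv acc → (∀ iv ∈ acc, iv.2 < j) →
    pvInv ((PySem.List.enumerate as j).foldl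
        (fun s p => if p.2 > l then pvAppendMerge s (p.1 - (min p.2 (t + 1) - l - 1), p.1) else s) acc) ∧
    (∀ iv ∈ (PySem.List.enumerate as j).foldl
        (fun s p => if p.2 > l then pvAppendMerge s (p.1 - (min p.2 (t + 1) - l - 1), p.1) else s) acc,
        iv.2 < j + as.length) ∧
    (∀ i, pvUnion ((PySem.List.enumerate as j).foldl
        (fun s p => if p.2 > l then pvAppendMerge s (p.1 - (min p.2 (t + 1) - l - 1), p.1) else s) acc) i ↔
      pvUnion acc i ∨ ∃ k : Nat, k < as.length ∧ l < as.getD k 0 ∧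
        (j + k) - (min (as.getD k 0) (t + 1) - l - 1) ≤ i ∧ i ≤ j + k) := by
  induction as with
  | nil =>
    intro j acc hinv hend
    refine ⟨by simpa [PySem.List.enumerate_nil] using hinv, ?_, ?_⟩
    · intro iv hiv; simp only [PySem.List.enumerate_nil, List.foldl_nil] at hiv
      have := hend iv hiv; simp only [List.length_nil]; push_cast; omega
    · intro i; simp [PySem.List.enumerate_nil]
  | cons x xs ih =>
    intro j acc hinv hend
    rw [PySem.List.enumerate_cons]
    simp only [List.foldl_cons]
    by_cases hx : x > l
    · have hne : (j - (min x (t + 1) - l - 1), j).1 ≤ (j - (min x (t + 1) - l - 1), j).2 := by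
        simp only; omega
      have hb : ∀ iv ∈ acc, iv.1 ≤ (j - (min x (t + 1) - l - 1), j).2 := by
        intro iv hiv; have h1 := hinv.2 iv hiv; have h2 := hend iv hiv; simp only; omega
      have hinv' := am_inv acc _ hinv hne hb
      have hend' : ∀ iv ∈ pvAppendMerge acc (j - (min x (t + 1) - l - 1), j), iv.2 < j + 1 := by
        intro iv hiv
        have := am_end_le acc _ j (fun iv hiv => le_of_lt (hend iv hiv)) (by simp) iv hiv
        omega
      obtain ⟨Hinv, Hend, Huni⟩ := ih (j + 1) _ hinv' hend'
      simp only [hx, if_pos, if_true]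
      refine ⟨Hinv, ?_, ?_⟩
      · intro iv hiv; have := Hend iv hiv; simp only [List.length_cons]; push_cast; push_cast at this; omega
      · intro i
        rw [Huni i, am_union acc _ hinv hne hb i]
        constructor
        · rintro ((h | h) | ⟨k, hk, h1, h2, h3⟩)
          · exact Or.inl h
          · refine Or.inr ⟨0, by simp, by simpa using hx, ?_⟩
            unfold pvCovers at h; simp only at h; simp; omega
          · refine Or.inr ⟨k + 1, by simpa using hk, by simpa using h1, ?_⟩
            simp only [List.getD_cons_succ]; push_cast; push_cast at h2 h3; omega
        · rintro (h | ⟨k, hk, h1, h2, h3⟩)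
          · exact Or.inl (Or.inl h)
          · cases k with
            | zero =>
              refine Or.inl (Or.inr ?_)
              unfold pvCovers; simp only; simp at h2 h3; omega
            | succ k =>
              refine Or.inr ⟨k, by simpa using hk, by simpa using h1, ?_⟩
              simp only [List.getD_cons_succ] at h2 h3; push_cast; push_cast at h2 h3; omega
    · simp only [hx, if_neg, if_false]
      obtain ⟨Hinv, Hend, Huni⟩ := ih (j + 1) acc hinv (fun iv hiv => by have := hend iv hiv; omega)
      refine ⟨Hinv, ?_, ?_⟩
      · intro iv hiv; have := Hend iv hiv; simp only [List.length_cons]; push_cast; push_cast at this; omega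
      · intro i
        rw [Huni i]
        constructor
        · rintro (h | ⟨k, hk, h1, h2, h3⟩)
          · exact Or.inl h
          · refine Or.inr ⟨k + 1, by simpa using hk, by simpa using h1, ?_⟩
            simp only [List.getD_cons_succ]; push_cast; push_cast at h2 h3; omega
        · rintro (h | ⟨k, hk, h1, h2, h3⟩)
          · exact Or.inl h
          · cases k with
            | zero => simp at h1; omega
            | succ k =>
              refine Or.inr ⟨k, by simpa using hk, by simpa using h1, ?_⟩
              simp only [List.getD_cons_succ] at h2 h3; push_cast; push_cast at h2 h3; omega

theorem right_fold (r t wl : Int) (hr : r ≤ t) (as : List Int) :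
    ∀ (j : Int) (acc : List (Int × Int)), pvInv acc → (∀ iv ∈ acc, iv.1 < j - (wl - 1)) →
    pvInv ((PySem.List.enumerate as j).foldl
        (fun s p => if p.2 > r then pvAppendMerge s (p.1 - (wl - 1), p.1 + (min p.2 (t + 1) - r - 1) - (wl - 1)) else s) acc) ∧
    (∀ iv ∈ (PySem.List.enumerate as j).foldl
        (fun s p => if p.2 > r then pvAppendMerge s (p.1 - (wl - 1), p.1 + (min p.2 (t + 1) - r - 1) - (wl - 1)) else s) acc,
        iv.1 < j + as.length - (wl - 1)) ∧
    (∀ i, pvUnion ((PySem.List.enumerate as j).foldl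
        (fun s p => if p.2 > r then pvAppendMerge s (p.1 - (wl - 1), p.1 + (min p.2 (t + 1) - r - 1) - (wl - 1)) else s) acc) i ↔
      pvUnion acc i ∨ ∃ k : Nat, k < as.length ∧ r < as.getD k 0 ∧
        (j + k) - (wl - 1) ≤ i ∧ i ≤ (j + k) + (min (as.getD k 0) (t + 1) - r - 1) - (wl - 1)) := by
  induction as with
  | nil =>
    intro j acc hinv hend
    refine ⟨by simpa [PySem.List.enumerate_nil] using hinv, ?_, ?_⟩
    · intro iv hiv; simp only [PySem.List.enumerate_nil, List.foldl_nil] at hiv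
      have := hend iv hiv; simp only [List.length_nil]; push_cast; omega
    · intro i; simp [PySem.List.enumerate_nil]
  | cons x xs ih =>
    intro j acc hinv hend
    rw [PySem.List.enumerate_cons]
    simp only [List.foldl_cons]
    by_cases hx : x > r
    · have hne : (j - (wl - 1), j + (min x (t + 1) - r - 1) - (wl - 1)).1 ≤
          (j - (wl - 1), j + (min x (t + 1) - r - 1) - (wl - 1)).2 := by
        simp only; omega
      have hb : ∀ iv ∈ acc, iv.1 ≤ (j - (wl - 1), j + (min x (t + 1) - r - 1) - (wl - 1)).2 := by
        intro iv hiv; have h2 := hend iv hiv; simp only; omega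
      have hinv' := am_inv acc _ hinv hne hb
      have hstart' : ∀ iv ∈ pvAppendMerge acc (j - (wl - 1), j + (min x (t + 1) - r - 1) - (wl - 1)),
          iv.1 < (j + 1) - (wl - 1) := by
        intro iv hiv
        have := am_start_le acc _ (j - (wl - 1)) (fun iv hiv => by have := hend iv hiv; omega)
          (by simp) iv hiv
        omega
      obtain ⟨Hinv, Hend, Huni⟩ := ih (j + 1) _ hinv' hstart'
      simp only [hx, if_pos]
      refine ⟨Hinv, ?_, ?_⟩
      · intro iv hiv; have := Hend iv hiv; simp only [List.length_cons]; push_cast; push_cast at this; omega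
      · intro i
        rw [Huni i, am_union acc _ hinv hne hb i]
        constructor
        · rintro ((h | h) | ⟨k, hk, h1, h2, h3⟩)
          · exact Or.inl h
          · refine Or.inr ⟨0, by simp, by simpa using hx, ?_⟩
            unfold pvCovers at h; simp only at h; simp; omega
          · refine Or.inr ⟨k + 1, by simpa using hk, by simpa using h1, ?_⟩
            simp only [List.getD_cons_succ]; push_cast; push_cast at h2 h3; omega
        · rintro (h | ⟨k, hk, h1, h2, h3⟩)
          · exact Or.inl (Or.inl h)
          · cases k with
            | zero =>
              refine Or.inl (Or.inr ?_)
              unfold pvCovers; simp only; simp at h2 h3; omega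
            | succ k =>
              refine Or.inr ⟨k, by simpa using hk, by simpa using h1, ?_⟩
              simp only [List.getD_cons_succ] at h2 h3; push_cast; push_cast at h2 h3; omega
    · simp only [hx, if_false]
      obtain ⟨Hinv, Hend, Huni⟩ := ih (j + 1) acc hinv (fun iv hiv => by have := hend iv hiv; omega)
      refine ⟨Hinv, ?_, ?_⟩
      · intro iv hiv; have := Hend iv hiv; simp only [List.length_cons]; push_cast; push_cast at this; omega
      · intro i
        rw [Huni i]
        constructor
        · rintro (h | ⟨k, hk, h1, h2, h3⟩)
          · exact Or.inl h
          · refine Or.inr ⟨k + 1, by simpa using hk, by simpa using h1, ?_⟩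
            simp only [List.getD_cons_succ]; push_cast; push_cast at h2 h3; omega
        · rintro (h | ⟨k, hk, h1, h2, h3⟩)
          · exact Or.inl h
          · cases k with
            | zero => simp at h1; omega
            | succ k =>
              refine Or.inr ⟨k, by simpa using hk, by simpa using h1, ?_⟩
              simp only [List.getD_cons_succ] at h2 h3; push_cast; push_cast at h2 h3; omega

theorem popWhile_append (i : Int) (pre s : List (Int × Int)) (h : ∀ iv ∈ pre, iv.2 < i) :
    pvPopWhile i (pre ++ s) = pvPopWhile i s := by
  induction pre with
  | nil => simp
  | cons x xs ih =>
    simp only [List.cons_append, pvPopWhile, h x (by simp), if_pos]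
    exact ih (fun iv hiv => h iv (by simp [hiv]))

theorem popWhile_decomp (i : Int) (s : List (Int × Int)) :
    ∃ pre, s = pre ++ pvPopWhile i s ∧ ∀ iv ∈ pre, iv.2 < i := by
  induction s with
  | nil => exact ⟨[], by simp [pvPopWhile]⟩
  | cons x xs ih =>
    by_cases hx : x.2 < i
    · obtain ⟨pre, heq, hpre⟩ := ih
      refine ⟨x :: pre, ?_, ?_⟩
      · simp only [pvPopWhile, hx, if_pos, List.cons_append]
        exact congrArg (x :: ·) heq
      · intro iv hiv; rcases List.mem_cons.mp hiv with rfl | hiv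
        · exact hx
        · exact hpre iv hiv
    · exact ⟨[], by simp [pvPopWhile, hx]⟩

theorem sweep_head (i : Int) (s : List (Int × Int)) (hs : pvInv s) :
    ((pvPopWhile i s).head?.elim false (fun iv => decide (iv.1 ≤ i) && decide (iv.2 ≥ i)) = true)
      ↔ pvUnion s i := by
  induction s with
  | nil => simp [pvPopWhile, pvUnion]
  | cons x xs ih =>
    have hinv' : pvInv xs := ⟨hs.1.of_cons, fun iv hiv => hs.2 iv (by simp [hiv])⟩
    by_cases hx : x.2 < i
    · simp only [pvPopWhile, hx, if_pos]
      rw [ih hinv']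
      constructor
      · intro h; obtain ⟨iv, hiv, hc⟩ := h; exact ⟨iv, by simp [hiv], hc⟩
      · rintro ⟨iv, hiv, hc⟩
        rcases List.mem_cons.mp hiv with rfl | hiv
        · unfold pvCovers at hc; omega
        · exact ⟨iv, hiv, hc⟩
    · simp only [pvPopWhile, hx, if_neg, List.head?_cons, Option.elim_some]
      by_cases hcov : x.1 ≤ i ∧ i ≤ x.2
      · refine ⟨fun _ => ⟨x, by simp, hcov⟩, fun _ => by simp; omega⟩
      · constructor
        · intro h; simp at h; omega
        · rintro ⟨iv, hiv, hc⟩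
          rcases List.mem_cons.mp hiv with rfl | hiv
          · exact absurd hc hcov
          · exfalso
            have := (List.pairwise_cons.mp hs.1).1 iv hiv
            unfold pvCovers at hc; omega






theorem costs_fold (WL : Int) (hWL2 : 2 ≤ WL) (a : List Int) (b : List Int) (hpre : b <+: a) :
    (PySem.List.enumerate b).foldl (pvCostStep WL a) ([], 0, 0) =
      ((List.range (b.length + 1 - WL.toNat)).map (fun i => pvWinSum b WL.toNat i),
       pvWinSum b WL.toNat (b.length - WL.toNat),
       min (b.length : Int) WL) := by
  obtain ⟨W, hWdef⟩ : ∃ W : Nat, WL.toNat = W := ⟨WL.toNat, rfl⟩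
  rw [hWdef]
  have hW : (W : Int) = WL := by rw [← hWdef]; exact Int.toNat_of_nonneg (by omega)
  induction b using List.reverseRecOn with
  | nil =>
    have h0 : 0 + 1 - W = 0 := by omega
    simp [PySem.List.enumerate_nil, pvWinSum, h0]
    omega
  | append_singleton b x ih =>
    have hpre' : b <+: a := (b.prefix_append [x]).trans hpre
    rw [PySem.List.enumerate_append, List.foldl_append, ih hpre']
    simp only [PySem.List.enumerate_cons, PySem.List.enumerate_nil, zero_add,
      List.foldl_cons, List.foldl_nil]
    obtain ⟨m, hm⟩ : ∃ m : Nat, b.length = m := ⟨b.length, rfl⟩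
    rw [hm]
    have hlen : (b ++ [x]).length = m + 1 := by simp [hm]
    rw [hlen]
    by_cases hc : W ≤ m
    · -- window already full: slide
      have hmin : min (m : Int) WL = WL := by omega
      obtain ⟨rest, hrest⟩ := hpre
      have hlt : m - W < b.length := by omega
      have hgetD : PySem.List.pyGetD a ((m : Int) - (WL + 1) + 1) 0 = b.getD (m - W) 0 := by
        have hidx : (m : Int) - (WL + 1) + 1 = ((m - W : Nat) : Int) := by push_cast; omega
        rw [hidx, PySem.List.pyGetD_natCast, ← hrest, List.append_assoc]
        rw [List.getD_eq_getElem?_getD, List.getElem?_append_left hlt]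
        simp [List.getElem?_eq_getElem hlt]
      have hslide : pvWinSum b W (m - W) + x - b.getD (m - W) 0 =
          pvWinSum (b ++ [x]) W (m + 1 - W) := by
        rw [List.getD_eq_getElem?_getD, List.getElem?_eq_getElem hlt]
        unfold pvWinSum
        rw [List.drop_append_of_le_length (by omega)]
        rw [List.drop_eq_getElem_cons (by omega : m - W < b.length)]
        cases W with
        | zero => omega
        | succ W' =>
          rw [List.take_succ_cons]
          have he : m - W'.succ + 1 = m + 1 - (W' + 1) := by omega
          rw [he]
          have h3 : (b.drop (m + 1 - (W' + 1))).take W' = b.drop (m + 1 - (W' + 1)) := by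
            apply List.take_of_length_le; simp; omega
          have h4 : (b.drop (m + 1 - (W' + 1)) ++ [x]).take (W' + 1) =
              b.drop (m + 1 - (W' + 1)) ++ [x] := by
            apply List.take_of_length_le; simp; omega
          rw [h3, h4]
          simp
          omega
      have hstep : pvCostStep WL a ((List.range (m + 1 - W)).map (fun i => pvWinSum b W i),
            pvWinSum b W (m - W), min (m : Int) WL) ((m : Int), x) =
          ((List.range (m + 1 - W)).map (fun i => pvWinSum b W i) ++
              [pvWinSum (b ++ [x]) W (m + 1 - W)],
            pvWinSum (b ++ [x]) W (m + 1 - W), WL) := by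
        simp only [pvCostStep, hmin]
        norm_num
        rw [hgetD, hslide]
      rw [hstep]
      simp only [Prod.mk.injEq]
      refine ⟨?_, by simp, by push_cast; omega⟩
      have hr1 : m + 1 + 1 - W = (m + 1 - W) + 1 := by omega
      rw [hr1, List.range_succ, List.map_append]
      have hmap : (List.range (m + 1 - W)).map (fun i => pvWinSum b W i) =
          (List.range (m + 1 - W)).map (fun i => pvWinSum (b ++ [x]) W i) := by
        apply List.map_congr_left
        intro i hi
        simp at hi
        unfold pvWinSum
        rw [List.drop_append_of_le_length (by omega)]
        rw [List.take_append_of_le_length (by simp; omega)]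
      rw [hmap]; simp
    · -- window not yet full
      have hmin : min (m : Int) WL = (m : Int) := by omega
      have hsum0 : pvWinSum b W 0 = b.sum := by
        unfold pvWinSum
        rw [List.drop_zero, List.take_of_length_le (by omega)]
      have hsum0' : pvWinSum (b ++ [x]) W 0 = b.sum + x := by
        unfold pvWinSum
        rw [List.drop_zero, List.take_of_length_le (by simp [hm]; omega)]
        simp
      have hmW : m - W = 0 := by omega
      by_cases hc2 : m + 1 = W
      · have hstep : pvCostStep WL a ((List.range (m + 1 - W)).map (fun i => pvWinSum b W i),
              pvWinSum b W (m - W), min (m : Int) WL) ((m : Int), x) =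
            ([pvWinSum b W (m - W) + x], pvWinSum b W (m - W) + x, (m : Int) + 1) := by
          simp only [pvCostStep, hmin]
          rw [if_neg (by omega : ¬ ((m : Int) + 1 > WL))]
          rw [if_neg (by omega : ¬ ((m : Int) + 1 > WL))]
          rw [if_pos (by simp; omega)]
          have h0 : m + 1 - W = 0 := by omega
          simp [h0]
        rw [hstep]
        simp only [Prod.mk.injEq]
        have h1 : m + 1 + 1 - W = 1 := by omega
        have h2 : m + 1 - W = 0 := by omega
        refine ⟨?_, ?_, by push_cast; omega⟩
        · rw [h1, hmW, hsum0, List.range_one]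
          simp [hsum0']
        · rw [hmW, hsum0, h2, hsum0']
      · have hstep : pvCostStep WL a ((List.range (m + 1 - W)).map (fun i => pvWinSum b W i),
              pvWinSum b W (m - W), min (m : Int) WL) ((m : Int), x) =
            ((List.range (m + 1 - W)).map (fun i => pvWinSum b W i),
              pvWinSum b W (m - W) + x, (m : Int) + 1) := by
          simp only [pvCostStep, hmin]
          rw [if_neg (by omega : ¬ ((m : Int) + 1 > WL))]
          rw [if_neg (by omega : ¬ ((m : Int) + 1 > WL))]
          rw [if_neg (by simp; omega)]
        rw [hstep]
        simp only [Prod.mk.injEq]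
        have h1 : m + 1 + 1 - W = 0 := by omega
        have h2 : m + 1 - W = 0 := by omega
        refine ⟨by rw [h1, h2]; simp, by rw [hmW, hsum0, h2, hsum0'], by push_cast; omega⟩

theorem gauss_asc (c : Int) : ∀ m : Nat,
    2 * (((List.range m).map (fun k : Nat => c + (k : Int))).sum) = (2 * c + m - 1) * m := by
  intro m
  induction m with
  | zero => simp
  | succ m ih =>
    rw [List.range_succ, List.map_append, List.sum_append]
    simp only [List.map_cons, List.map_nil, List.sum_cons, List.sum_nil]
    push_cast
    push_cast at ih
    linear_combination ih

theorem gauss_desc (c : Int) : ∀ m : Nat,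
    2 * (((List.range m).map (fun k : Nat => c - (k : Int))).sum) = (2 * c - m + 1) * m := by
  intro m
  induction m with
  | zero => simp
  | succ m ih =>
    rw [List.range_succ, List.map_append, List.sum_append]
    simp only [List.map_cons, List.map_nil, List.sum_cons, List.sum_nil]
    push_cast
    push_cast at ih
    linear_combination ih

theorem strong_eq (l t r : Int) (hl : l ≤ t) (hr : r ≤ t) :
    PySem.Int.floordiv ((t + l) * (t - l + 1)) 2 + PySem.Int.floordiv ((t + r) * (t - r + 1)) 2 =
      (PySem.List.pyRange l (t + 1) 1 ++ PySem.List.pyRange t (r - 1) (-1)).sum := by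
  rw [List.sum_append]
  have h1 : (PySem.List.pyRange l (t + 1) 1).sum =
      ((List.range (t + 1 - l).toNat).map (fun k : Nat => l + (k : Int))).sum := by
    rw [PySem.List.pyRange_one]
  have h2 : (PySem.List.pyRange t (r - 1) (-1)).sum =
      ((List.range (t - (r - 1)).toNat).map (fun k : Nat => t - (k : Int))).sum := by
    rw [PySem.List.pyRange_neg_one]
  rw [h1, h2]
  have hm1 : ((t + 1 - l).toNat : Int) = t + 1 - l := Int.toNat_of_nonneg (by omega)
  have hm2 : ((t - (r - 1)).toNat : Int) = t - r + 1 := by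
    rw [Int.toNat_of_nonneg (by omega)]; ring
  have g1 := gauss_asc l (t + 1 - l).toNat
  have g2 := gauss_desc t (t - (r - 1)).toNat
  rw [hm1] at g1
  rw [hm2] at g2
  have e1 : (t + l) * (t - l + 1) = 2 * ((List.range (t + 1 - l).toNat).map (fun k : Nat => l + (k : Int))).sum := by
    rw [g1]; ring
  have e2 : (t + r) * (t - r + 1) = 2 * ((List.range (t - (r - 1)).toNat).map (fun k : Nat => t - (k : Int))).sum := by
    rw [g2]; ring
  rw [e1, e2, PySem.Int.floordiv_eq_ediv_of_pos (by norm_num), PySem.Int.floordiv_eq_ediv_of_pos (by norm_num)]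
  rw [Int.mul_ediv_cancel_left _ (by norm_num), Int.mul_ediv_cancel_left _ (by norm_num)]

theorem winsum_slide (a : List Int) (W : Nat) (hW : 1 ≤ W) (i : Nat) (hi : 1 ≤ i)
    (hle : i + W ≤ a.length) :
    pvWinSum a W i = pvWinSum a W (i - 1) + a.getD (i + W - 1) 0 - a.getD (i - 1) 0 := by
  obtain ⟨j, rfl⟩ : ∃ j, i = j + 1 := ⟨i - 1, by omega⟩
  obtain ⟨V, hV⟩ : ∃ V, W = V + 1 := ⟨W - 1, by omega⟩
  subst hV
  unfold pvWinSum
  simp only [Nat.add_sub_cancel]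
  have hj : j < a.length := by omega
  have hjV : j + 1 + V < a.length := by omega
  rw [List.drop_eq_getElem_cons hj, List.take_succ_cons]
  rw [List.take_succ]
  have hget : (a.drop (j + 1))[V]? = some a[j + 1 + V] := by
    rw [List.getElem?_drop]
    exact List.getElem?_eq_getElem hjV
  rw [hget]
  have hgd1 : a.getD (j + 1 + (V + 1) - 1) 0 = a[j + 1 + V] := by
    have : j + 1 + (V + 1) - 1 = j + 1 + V := by omega
    rw [this, List.getD_eq_getElem?_getD, List.getElem?_eq_getElem hjV]; rfl
  have hgd2 : a.getD j 0 = a[j] := by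
    rw [List.getD_eq_getElem?_getD, List.getElem?_eq_getElem hj]; rfl
  rw [hgd1, hgd2]
  simp
  ring

theorem prof_getD (l t r : Int) (hl : l ≤ t) (hr : r ≤ t) (d : Nat)
    (hd : (d : Int) < (t - l + 1) + (t - r + 1)) :
    (PySem.List.pyRange l (t + 1) 1 ++ PySem.List.pyRange t (r - 1) (-1)).getD d 0 =
      if (d : Int) ≤ t - l then l + d else 2 * t - l + 1 - d := by
  have hlen1 : (PySem.List.pyRange l (t + 1) 1).length = (t + 1 - l).toNat :=
    PySem.List.length_pyRange_one l (t + 1)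
  by_cases hcase : (d : Int) ≤ t - l
  · have hdlt : d < (PySem.List.pyRange l (t + 1) 1).length := by rw [hlen1]; omega
    rw [if_pos hcase, List.getD_eq_getElem?_getD, List.getElem?_append_left hdlt,
      List.getElem?_eq_getElem hdlt]
    rw [PySem.List.getElem_pyRange_one]
    rfl
  · have hdge : (PySem.List.pyRange l (t + 1) 1).length ≤ d := by rw [hlen1]; omega
    rw [if_neg hcase, List.getD_eq_getElem?_getD, List.getElem?_append_right hdge]
    rw [hlen1]
    have hrw : PySem.List.pyRange t (r - 1) (-1) =
        (List.range (t - (r - 1)).toNat).map (fun k : Nat => t - (k : Int)) := by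
      rw [PySem.List.pyRange_neg_one]
    rw [hrw]
    have hd2 : d - (t + 1 - l).toNat < (t - (r - 1)).toNat := by omega
    rw [List.getElem?_map, List.getElem?_range hd2]
    simp only [Option.map_some, Option.getD_some]
    have : ((d - (t + 1 - l).toNat : Nat) : Int) = (d : Int) - (t + 1 - l) := by
      push_cast; omega
    rw [this]
    ring

theorem cond_iff (l t r : Int) (hl : l ≤ t) (hr : r ≤ t) (a : List Int) (i : Int)
    (h0 : 0 ≤ i) (hiN : i ≤ (a.length : Int) - ((t - l + 1) + (t - r + 1))) :
    ((∃ k : Nat, k < a.length ∧ l < a.getD k 0 ∧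
        ((0 : Int) + (k : Int)) - (min (a.getD k 0) (t + 1) - l - 1) ≤ i ∧ i ≤ (0 : Int) + (k : Int)) ∨
     (∃ k : Nat, k < a.length ∧ r < a.getD k 0 ∧
        ((0 : Int) + (k : Int)) - ((t - l + 1) + (t - r + 1) - 1) ≤ i ∧
        i ≤ ((0 : Int) + (k : Int)) + (min (a.getD k 0) (t + 1) - r - 1) - ((t - l + 1) + (t - r + 1) - 1)))
    ↔ (∃ d : Nat, (d : Int) < (t - l + 1) + (t - r + 1) ∧
        (if (d : Int) ≤ t - l then l + (d : Int) else 2 * t - l + 1 - (d : Int)) < a.getD (i.toNat + d) 0) := by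
  constructor
  · rintro (⟨k, hk, hv, h1, h2⟩ | ⟨k, hk, hv, h1, h2⟩)
    · refine ⟨k - i.toNat, ?_, ?_⟩
      · push_cast; omega
      · have hik : i.toNat + (k - i.toNat) = k := by omega
        rw [hik, if_pos (by push_cast; omega)]
        push_cast; omega
    · refine ⟨k - i.toNat, ?_, ?_⟩
      · push_cast; omega
      · have hki : (t - l + 1) ≤ (k : Int) - i := by omega
        have hik : i.toNat + (k - i.toNat) = k := by omega
        rw [hik, if_neg (by push_cast; omega)]
        push_cast; omega
  · rintro ⟨d, hd, hv⟩
    by_cases hcase : (d : Int) ≤ t - l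
    · rw [if_pos hcase] at hv
      left
      refine ⟨i.toNat + d, by omega, by push_cast at hv ⊢; omega, by push_cast; omega, by push_cast; omega⟩
    · rw [if_neg hcase] at hv
      right
      refine ⟨i.toNat + d, by omega, by push_cast at hv ⊢; omega, by push_cast; omega, by push_cast; omega⟩

def pvStepA (costs : List Int) (s : List (Int × Int) × List (Int × Int) × Option Int) (i : Int) :
    List (Int × Int) × List (Int × Int) × Option Int :=
  let int1 := pvPopWhile i s.1
  let int2 := pvPopWhile i s.2.1
  if int1.head?.elim false (fun iv => decide (iv.1 ≤ i) && decide (iv.2 ≥ i)) then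
    (int1, int2, s.2.2)
  else if int2.head?.elim false (fun iv => decide (iv.1 ≤ i) && decide (iv.2 ≥ i)) then
    (int1, int2, s.2.2)
  else
    (int1, int2, some (match s.2.2 with
      | none => PySem.List.pyGetD costs i 0
      | some m => min m (PySem.List.pyGetD costs i 0)))

def pvStepB (a profile : List Int) (target wI : Int) (s : Int × Option Int) (i : Int) :
    Int × Option Int :=
  let win := if i ≠ 0 then
      s.1 + PySem.List.pyGetD a (i + wI - 1) 0 - PySem.List.pyGetD a (i - 1) 0
    else s.1
  if (PySem.List.pyRange 0 wI 1).all
      (fun d => decide (PySem.List.pyGetD a (i + d) 0 ≤ PySem.List.pyGetD profile d 0)) then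
    (win, some (match s.2 with
      | none => target - win
      | some b => if target - win < b then target - win else b))
  else (win, s.2)

theorem main_loop
    (a costs profile : List Int) (target : Int) (L0 R0 : List (Int × Int))
    (hInvL : pvInv L0) (hInvR : pvInv R0)
    (W : Nat) (hW1 : 1 ≤ W) (hprofW : profile.length = W) (hWn : W ≤ a.length)
    (hcond : ∀ i : Int, 0 ≤ i → i < (a.length : Int) - W + 1 →
      (((PySem.List.pyRange 0 ((W : Nat) : Int) 1).all
          (fun d => decide (PySem.List.pyGetD a (i + d) 0 ≤ PySem.List.pyGetD profile d 0))) = false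
        ↔ (pvUnion L0 i ∨ pvUnion R0 i)))
    (hcost : ∀ i : Int, 0 ≤ i → i < (a.length : Int) - W + 1 →
      PySem.List.pyGetD costs i 0 = target - pvWinSum a W i.toNat) :
    ∀ (cnt : Nat) (lo : Int) (s1 s2 pre1 pre2 : List (Int × Int)) (win : Int) (mc : Option Int),
      lo + cnt = (a.length : Int) - W + 1 → 0 ≤ lo →
      L0 = pre1 ++ s1 → (∀ iv ∈ pre1, iv.2 < lo) →
      R0 = pre2 ++ s2 → (∀ iv ∈ pre2, iv.2 < lo) →
      ((lo = 0 ∧ win = pvWinSum a W 0) ∨ (1 ≤ lo ∧ win = pvWinSum a W (lo - 1).toNat)) →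
      ((PySem.List.pyRange lo ((a.length : Int) - W + 1) 1).foldl (pvStepA costs) (s1, s2, mc)).2.2 =
      ((PySem.List.pyRange lo ((a.length : Int) - W + 1) 1).foldl (pvStepB a profile target ((W : Nat) : Int)) (win, mc)).2 := by
  intro cnt
  induction cnt with
  | zero =>
    intro lo s1 s2 pre1 pre2 win mc hcnt h0 hL hpre1 hR hpre2 hwin
    rw [PySem.List.pyRange_one_eq_nil (by omega)]
    simp
  | succ cnt ih =>
    intro lo s1 s2 pre1 pre2 win mc hcnt h0 hL hpre1 hR hpre2 hwin
    rw [PySem.List.pyRange_one_cons (by omega)]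
    simp only [List.foldl_cons]
    -- the popped states
    have hpop1 : pvPopWhile lo s1 = pvPopWhile lo L0 := by
      rw [hL, popWhile_append lo pre1 s1 hpre1]
    have hpop2 : pvPopWhile lo s2 = pvPopWhile lo R0 := by
      rw [hR, popWhile_append lo pre2 s2 hpre2]
    have hs1 : ((pvPopWhile lo L0).head?.elim false
        (fun iv => decide (iv.1 ≤ lo) && decide (iv.2 ≥ lo)) = true) ↔ pvUnion L0 lo :=
      sweep_head lo L0 hInvL
    have hs2 : ((pvPopWhile lo R0).head?.elim false
        (fun iv => decide (iv.1 ≤ lo) && decide (iv.2 ≥ lo)) = true) ↔ pvUnion R0 lo :=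
      sweep_head lo R0 hInvR
    -- decompositions for the recursive call
    obtain ⟨q1, hq1, hq1lt⟩ := popWhile_decomp lo L0
    obtain ⟨q2, hq2, hq2lt⟩ := popWhile_decomp lo R0
    -- new window sum
    have hlo_hi : lo ≤ (a.length : Int) - W := by omega
    have hwin' : (if lo ≠ 0 then
        win + PySem.List.pyGetD a (lo + ((W : Nat) : Int) - 1) 0 - PySem.List.pyGetD a (lo - 1) 0
      else win) = pvWinSum a W lo.toNat := by
      rcases hwin with ⟨rfl, hw⟩ | ⟨hlo1, hw⟩
      · simp [hw]
      · rw [if_pos (by omega)]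
        have e1 : lo + ((W : Nat) : Int) - 1 = ((lo.toNat + W - 1 : Nat) : Int) := by
          push_cast; omega
        have e2 : lo - 1 = ((lo.toNat - 1 : Nat) : Int) := by push_cast; omega
        rw [e1, e2, PySem.List.pyGetD_natCast, PySem.List.pyGetD_natCast]
        rw [hw, winsum_slide a W hW1 lo.toNat (by omega) (by omega)]
        have : (lo - 1).toNat = lo.toNat - 1 := by omega
        rw [this]
    -- one step, four coverage cases
    have hstep : (pvStepA costs (s1, s2, mc) lo).2.2 = (pvStepB a profile target ((W : Nat) : Int) (win, mc) lo).2 ∧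
        (pvStepA costs (s1, s2, mc) lo).1 = pvPopWhile lo L0 ∧
        (pvStepA costs (s1, s2, mc) lo).2.1 = pvPopWhile lo R0 ∧
        (pvStepB a profile target ((W : Nat) : Int) (win, mc) lo).1 = pvWinSum a W lo.toNat := by
      by_cases hU : pvUnion L0 lo ∨ pvUnion R0 lo
      · have hall : ((PySem.List.pyRange 0 ((W : Nat) : Int) 1).all
            (fun d => decide (PySem.List.pyGetD a (lo + d) 0 ≤ PySem.List.pyGetD profile d 0))) = false :=
          (hcond lo h0 (by omega)).mpr hU
        simp only [pvStepA, pvStepB, hpop1, hpop2, hall, Bool.false_eq_true, if_false, hwin']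
        rcases hU with hU | hU
        · rw [if_pos (hs1.mpr hU)]
          exact ⟨by trivial, by trivial, by trivial, by trivial⟩
        · by_cases hU1 : pvUnion L0 lo
          · rw [if_pos (hs1.mpr hU1)]
            exact ⟨by trivial, by trivial, by trivial, by trivial⟩
          · rw [if_neg (fun hc => hU1 (hs1.mp hc)), if_pos (hs2.mpr hU)]
            exact ⟨by trivial, by trivial, by trivial, by trivial⟩
      · push_neg at hU
        have hall : ((PySem.List.pyRange 0 ((W : Nat) : Int) 1).all
            (fun d => decide (PySem.List.pyGetD a (lo + d) 0 ≤ PySem.List.pyGetD profile d 0))) = true := by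
          have hnf : ¬ (((PySem.List.pyRange 0 ((W : Nat) : Int) 1).all
              (fun d => decide (PySem.List.pyGetD a (lo + d) 0 ≤ PySem.List.pyGetD profile d 0))) = false) :=
            fun hf => absurd ((hcond lo h0 (by omega)).mp hf) (by tauto)
          revert hnf
          cases ((PySem.List.pyRange 0 ((W : Nat) : Int) 1).all
              (fun d => decide (PySem.List.pyGetD a (lo + d) 0 ≤ PySem.List.pyGetD profile d 0))) <;> simp
        simp only [pvStepA, pvStepB, hpop1, hpop2, hall, if_true, hwin']
        rw [if_neg (fun hc => hU.1 (hs1.mp hc)), if_neg (fun hc => hU.2 (hs2.mp hc))]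
        refine ⟨?_, by trivial, by trivial, by trivial⟩
        simp only [Prod.mk.injEq]
        cases mc with
        | none => simp [hcost lo h0 (by omega)]
        | some m =>
          simp only
          congr 1
          rw [hcost lo h0 (by omega)]
          by_cases hcmp : m ≤ target - pvWinSum a W lo.toNat
          · rw [min_eq_left hcmp, if_neg (by omega)]
          · rw [min_eq_right (by omega), if_pos (by omega)]
    -- recurse
    obtain ⟨hmc, hA1, hA2, hB1⟩ := hstep
    have hres := ih (lo + 1) (pvPopWhile lo L0) (pvPopWhile lo R0) q1 q2
      (pvWinSum a W lo.toNat) (pvStepB a profile target ((W : Nat) : Int) (win, mc) lo).2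
      (by omega) (by omega) hq1 (fun iv hiv => by have := hq1lt iv hiv; omega)
      hq2 (fun iv hiv => by have := hq2lt iv hiv; omega)
      (Or.inr ⟨by omega, by congr 1; omega⟩)
    have hAeq : pvStepA costs (s1, s2, mc) lo =
        (pvPopWhile lo L0, pvPopWhile lo R0, (pvStepB a profile target ((W : Nat) : Int) (win, mc) lo).2) := by
      have h3 := hmc
      exact Prod.ext hA1 (Prod.ext hA2 h3)
    have hBeq : pvStepB a profile target ((W : Nat) : Int) (win, mc) lo =
        (pvWinSum a W lo.toNat, (pvStepB a profile target ((W : Nat) : Int) (win, mc) lo).2) :=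
      Prod.ext hB1 rfl
    rw [hAeq, hBeq]
    exact hres

theorem allB_iff (a profile : List Int) (W : Nat) (hprofW : profile.length = W) (i : Int) (h0 : 0 ≤ i) :
    (((PySem.List.pyRange 0 ((W : Nat) : Int) 1).all
        (fun d => decide (PySem.List.pyGetD a (i + d) 0 ≤ PySem.List.pyGetD profile d 0))) = false)
    ↔ ∃ d : Nat, d < W ∧ profile.getD d 0 < a.getD (i.toNat + d) 0 := by
  rw [List.all_eq_false]
  constructor
  · rintro ⟨d, hd, hdec⟩
    rw [PySem.List.mem_pyRange_one] at hd
    refine ⟨d.toNat, by omega, ?_⟩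
    have e1 : i + d = ((i.toNat + d.toNat : Nat) : Int) := by push_cast; omega
    have e2 : d = ((d.toNat : Nat) : Int) := by omega
    rw [e1, e2, PySem.List.pyGetD_natCast, PySem.List.pyGetD_natCast] at hdec
    simp only [decide_eq_true_eq, Int.toNat_natCast] at hdec
    omega
  · rintro ⟨d, hd, hlt⟩
    refine ⟨(d : Int), by rw [PySem.List.mem_pyRange_one]; omega, ?_⟩
    have e1 : i + (d : Int) = ((i.toNat + d : Nat) : Int) := by push_cast; omega
    rw [e1, PySem.List.pyGetD_natCast, PySem.List.pyGetD_natCast]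
    simp only [decide_eq_true_eq]
    omega

theorem getCosts_eq (l t r : Int) (hl : l ≤ t) (hr : r ≤ t) (a : List Int) :
    pvGetCosts l t r a = (List.range (a.length + 1 - ((t - l + 1) + (t - r + 1)).toNat)).map
      (fun i => (PySem.List.pyRange l (t + 1) 1 ++ PySem.List.pyRange t (r - 1) (-1)).sum -
        pvWinSum a ((t - l + 1) + (t - r + 1)).toNat i) := by
  show (((PySem.List.enumerate a).foldl (pvCostStep ((t - l + 1) + (t - r + 1)) a) ([], 0, 0)).1).map
      (fun c => PySem.Int.floordiv ((t + l) * (t - l + 1)) 2 +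
        PySem.Int.floordiv ((t + r) * (t - r + 1)) 2 - c) = _
  rw [costs_fold ((t - l + 1) + (t - r + 1)) (by omega) a a (List.prefix_refl a)]
  simp only [List.map_map]
  apply List.map_congr_left
  intro k _
  simp only [Function.comp_apply]
  rw [strong_eq l t r hl hr]

theorem inval_eq (l t r : Int) (a : List Int) : pvGetInvalIntervals l t r a =
    ((PySem.List.enumerate a).foldl
      (fun s p => if p.2 > l then pvAppendMerge s (p.1 - (min p.2 (t + 1) - l - 1), p.1) else s) [],
     (PySem.List.enumerate a).foldl
      (fun s p => if p.2 > r then pvAppendMerge s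
        (p.1 - ((t - l + 1) + (t - r + 1) - 1),
         p.1 + (min p.2 (t + 1) - r - 1) - ((t - l + 1) + (t - r + 1) - 1)) else s) []) := by
  show (PySem.List.enumerate a).foldl (fun s p =>
    ((fun s1 (p : Int × Int) => if p.2 > l then pvAppendMerge s1 (p.1 - (min p.2 (t + 1) - l - 1), p.1) else s1) s.1 p,
     (fun s2 (p : Int × Int) => if p.2 > r then pvAppendMerge s2
        (p.1 - ((t - l + 1) + (t - r + 1) - 1),
         p.1 + (min p.2 (t + 1) - r - 1) - ((t - l + 1) + (t - r + 1) - 1)) else s2) s.2 p)) ([], []) = _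
  exact PySem.List.foldl_prod_mk
    (f := fun s1 (p : Int × Int) => if p.2 > l then pvAppendMerge s1 (p.1 - (min p.2 (t + 1) - l - 1), p.1) else s1)
    (g := fun s2 (p : Int × Int) => if p.2 > r then pvAppendMerge s2
        (p.1 - ((t - l + 1) + (t - r + 1) - 1),
         p.1 + (min p.2 (t + 1) - r - 1) - ((t - l + 1) + (t - r + 1) - 1)) else s2)
    (PySem.List.enumerate a) [] []

set_option maxHeartbeats 2000000 in
theorem solve_eq (l t r : Int) (a : List Int) (hl : l ≤ t) (hr : r ≤ t) :
    solve l t r a = solve_alt l t r a := by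
  obtain ⟨W, hWdef⟩ : ∃ W : Nat, ((t - l + 1) + (t - r + 1)).toNat = W := ⟨_, rfl⟩
  have hW : (W : Int) = (t - l + 1) + (t - r + 1) := by
    rw [← hWdef]; exact Int.toNat_of_nonneg (by omega)
  have hW1 : 1 ≤ W := by omega
  have hprofW : (PySem.List.pyRange l (t + 1) 1 ++ PySem.List.pyRange t (r - 1) (-1)).length = W := by
    rw [List.length_append, PySem.List.length_pyRange_one, PySem.List.pyRange_neg_one,
      List.length_map, List.length_range]
    omega
  -- invariant facts about the two interval lists
  obtain ⟨hInvL, hEndL, hUniL⟩ := left_fold l t hl a 0 []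
    ⟨List.Pairwise.nil, by simp⟩ (by simp)
  obtain ⟨hInvR, hEndR, hUniR⟩ := right_fold r t ((t - l + 1) + (t - r + 1)) hr a 0 []
    ⟨List.Pairwise.nil, by simp⟩ (by simp)
  -- the per-position condition equivalence
  have hcond : ∀ i : Int, 0 ≤ i → i < (a.length : Int) - W + 1 →
      (((PySem.List.pyRange 0 ((W : Nat) : Int) 1).all
          (fun d => decide (PySem.List.pyGetD a (i + d) 0 ≤ PySem.List.pyGetD (PySem.List.pyRange l (t + 1) 1 ++ PySem.List.pyRange t (r - 1) (-1)) d 0))) = false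
        ↔ (pvUnion ((PySem.List.enumerate a).foldl
      (fun s p => if p.2 > l then pvAppendMerge s (p.1 - (min p.2 (t + 1) - l - 1), p.1) else s) []) i ∨
           pvUnion ((PySem.List.enumerate a).foldl
      (fun s p => if p.2 > r then pvAppendMerge s
        (p.1 - ((t - l + 1) + (t - r + 1) - 1),
         p.1 + (min p.2 (t + 1) - r - 1) - ((t - l + 1) + (t - r + 1) - 1)) else s) []) i)) := by
    intro i h0 hi
    rw [allB_iff a (PySem.List.pyRange l (t + 1) 1 ++ PySem.List.pyRange t (r - 1) (-1)) W hprofW i h0]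
    have h1 : (∃ d : Nat, d < W ∧
          (PySem.List.pyRange l (t + 1) 1 ++ PySem.List.pyRange t (r - 1) (-1)).getD d 0 < a.getD (i.toNat + d) 0) ↔
        (∃ d : Nat, (d : Int) < (t - l + 1) + (t - r + 1) ∧
          (if (d : Int) ≤ t - l then l + (d : Int) else 2 * t - l + 1 - (d : Int)) <
            a.getD (i.toNat + d) 0) := by
      constructor
      · rintro ⟨d, hd, hv⟩
        refine ⟨d, by omega, ?_⟩
        rw [← prof_getD l t r hl hr d (by omega)]
        exact hv
      · rintro ⟨d, hd, hv⟩
        refine ⟨d, by omega, ?_⟩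
        rw [prof_getD l t r hl hr d hd]
        exact hv
    rw [h1, ← cond_iff l t r hl hr a i h0 (by omega)]
    rw [hUniL i, hUniR i]
    have hemp : pvUnion [] i ↔ False := by simp [pvUnion]
    rw [hemp]
    simp only [false_or]
  have hcost : ∀ i : Int, 0 ≤ i → i < (a.length : Int) - W + 1 →
      PySem.List.pyGetD (pvGetCosts l t r a) i 0 = (PySem.List.pyRange l (t + 1) 1 ++ PySem.List.pyRange t (r - 1) (-1)).sum - pvWinSum a W i.toNat := by
    intro i h0 hi
    rw [getCosts_eq l t r hl hr a, hWdef]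
    have e : i = ((i.toNat : Nat) : Int) := by omega
    rw [e, PySem.List.pyGetD_natCast]
    rw [List.getD_eq_getElem?_getD, List.getElem?_map,
      List.getElem?_range (by omega : i.toNat < a.length + 1 - W)]
    simp
    congr 1
    omega
  -- reshape both ports
  rw [show solve l t r a = (match ((PySem.List.pyRange 0 ((a.length : Int) - ((t - l + 1) + (t - r + 1) - 1)) 1).foldl
        (pvStepA (pvGetCosts l t r a))
        ((pvGetInvalIntervals l t r a).1, (pvGetInvalIntervals l t r a).2, none)).2.2 with
      | none => -1 | some m => m) from rfl]
  rw [show solve_alt l t r a = (if ((a.length : Int) < (t - l + 1) + (t - r + 1)) then -1 else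
      (match ((PySem.List.pyRange 0 ((a.length : Int) - ((t - l + 1) + (t - r + 1)) + 1) 1).foldl
          (pvStepB a (PySem.List.pyRange l (t + 1) 1 ++ PySem.List.pyRange t (r - 1) (-1)) (PySem.List.pyRange l (t + 1) 1 ++ PySem.List.pyRange t (r - 1) (-1)).sum ((t - l + 1) + (t - r + 1)))
          ((PySem.List.slice a none (some ((t - l + 1) + (t - r + 1)))).sum, none)).2 with
        | none => -1 | some b => b)) from rfl]
  rw [inval_eq l t r a]
  have eA : (a.length : Int) - ((t - l + 1) + (t - r + 1) - 1) =
      (a.length : Int) - ((t - l + 1) + (t - r + 1)) + 1 := by omega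
  rw [eA]
  by_cases hn : W ≤ a.length
  · rw [if_neg (by omega : ¬ ((a.length : Int) < (t - l + 1) + (t - r + 1)))]
    have hwin0 : (PySem.List.slice a none (some ((W : Nat) : Int))).sum = pvWinSum a W 0 := by
      rw [PySem.List.slice_to_natCast]
      simp [pvWinSum]
    have hcnt : (0 : Int) + (((a.length : Int) - W + 1).toNat : Int) = (a.length : Int) - W + 1 := by
      omega
    have hfold := main_loop a (pvGetCosts l t r a) (PySem.List.pyRange l (t + 1) 1 ++ PySem.List.pyRange t (r - 1) (-1)) (PySem.List.pyRange l (t + 1) 1 ++ PySem.List.pyRange t (r - 1) (-1)).sum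
      ((PySem.List.enumerate a).foldl
      (fun s p => if p.2 > l then pvAppendMerge s (p.1 - (min p.2 (t + 1) - l - 1), p.1) else s) [])
      ((PySem.List.enumerate a).foldl
      (fun s p => if p.2 > r then pvAppendMerge s
        (p.1 - ((t - l + 1) + (t - r + 1) - 1),
         p.1 + (min p.2 (t + 1) - r - 1) - ((t - l + 1) + (t - r + 1) - 1)) else s) [])
      hInvL hInvR W hW1 hprofW hn hcond hcost
      (((a.length : Int) - W + 1).toNat) 0
      ((PySem.List.enumerate a).foldl
      (fun s p => if p.2 > l then pvAppendMerge s (p.1 - (min p.2 (t + 1) - l - 1), p.1) else s) [])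
      ((PySem.List.enumerate a).foldl
      (fun s p => if p.2 > r then pvAppendMerge s
        (p.1 - ((t - l + 1) + (t - r + 1) - 1),
         p.1 + (min p.2 (t + 1) - r - 1) - ((t - l + 1) + (t - r + 1) - 1)) else s) [])
      [] [] ((PySem.List.slice a none (some ((W : Nat) : Int))).sum) none
      hcnt le_rfl (by simp) (by simp) (by simp) (by simp)
      (Or.inl ⟨rfl, hwin0⟩)
    rw [hW] at hfold
    rw [hfold]
  · have hArange : PySem.List.pyRange 0 ((a.length : Int) - ((t - l + 1) + (t - r + 1)) + 1) 1 = [] :=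
      PySem.List.pyRange_one_eq_nil (by omega)
    rw [hArange]
    rw [if_pos (by omega : (a.length : Int) < (t - l + 1) + (t - r + 1))]
    simp

-- ===== VERDICT (by name: the statement is the Claim_ definition above) =====
theorem solve_spec : Claim_equal_solve := by
  intro l t r a _ hpre
  unfold Spec_solve
  exact solve_eq l t r a hpre.1 hpre.2
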